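-- pv_equiv track=rewrite | github.com/BenjiSomur/HEGACluster | src/fitness.py | calc_intraedges
-- ===== SOURCE A (Python) =====
-- def calc_intraedges(_clust, _ref):
--     _sum = 0
--     for _idc in _clust:
--         for _aux in _clust:
--             if _idc == _aux:
--                 continue
--             _sum += _ref[_idc - 1][_aux - 1]
--     return _sum
-- ===== SOURCE B (Python) =====
-- def calc_intraedges(_clust, _ref):
--     counts = {}
--     for v in _clust:
--         counts[v] = counts.get(v, 0) + 1
--     total = 0
--     for v, mv in counts.items():
--         for w, mw in counts.items():
--             if v != w:
--                 total += mv * mw * _ref[v - 1][w - 1]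
--     return total
-- ===== Notes on version B (the rewrite author's own statement) =====
-- stated objective: faster
-- what changed: B first builds a multiplicity dictionary of the cluster values in one pass, then sums _ref[v-1][w-1] weighted by count(v)*count(w) over DISTINCT value pairs, instead of A's direct double loop over all cluster elements.
import Mathlib
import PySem

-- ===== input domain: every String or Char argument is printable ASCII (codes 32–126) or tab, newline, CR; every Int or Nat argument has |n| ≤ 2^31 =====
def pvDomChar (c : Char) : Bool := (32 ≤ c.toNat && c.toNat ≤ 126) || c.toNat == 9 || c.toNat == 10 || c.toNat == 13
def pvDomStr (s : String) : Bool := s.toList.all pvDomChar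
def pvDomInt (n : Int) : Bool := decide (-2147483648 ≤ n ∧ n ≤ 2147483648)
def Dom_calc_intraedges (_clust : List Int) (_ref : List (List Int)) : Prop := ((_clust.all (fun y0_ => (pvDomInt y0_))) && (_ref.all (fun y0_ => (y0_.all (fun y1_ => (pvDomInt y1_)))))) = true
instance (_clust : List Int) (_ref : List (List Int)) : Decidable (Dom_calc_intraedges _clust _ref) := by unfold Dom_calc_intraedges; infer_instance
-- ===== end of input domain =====

-- B replaces A's double loop over cluster elements by a multiplicity-dictionary sum over distinct value pairs (alternative decomposition).

-- ===== PORT A =====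
def calc_intraedges (_clust : List Int) (_ref : List (List Int)) : Int :=
  _clust.foldl (fun _sum _idc =>
    _clust.foldl (fun _sum _aux =>
      if _idc == _aux then _sum
      else _sum + PySem.List.pyGetD (PySem.List.pyGetD _ref (_idc - 1) []) (_aux - 1) 0) _sum) 0

-- ===== PORT B =====
def calc_intraedges_alt (_clust : List Int) (_ref : List (List Int)) : Int :=
  let counts := _clust.foldl (fun d v => d.insert v (d.getD v 0 + 1)) (PySem.Dict.empty : PySem.Dict Int Int)
  counts.items.foldl (fun total p =>
    counts.items.foldl (fun total q =>
      if p.1 == q.1 then total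
      else total + p.2 * q.2 * PySem.List.pyGetD (PySem.List.pyGetD _ref (p.1 - 1) []) (q.1 - 1) 0) total) 0

-- ===== PRECONDITION & SPEC =====
-- Pre_ excludes exactly the inputs on which Python A raises IndexError: some pair of
-- distinct cluster values indexes outside _ref or outside the selected row.
def Pre_calc_intraedges (_clust : List Int) (_ref : List (List Int)) : Prop :=
  ∀ a ∈ _clust, ∀ b ∈ _clust, a ≠ b →
    PySem.Raise.InRange _ref.length (a - 1) ∧
    PySem.Raise.InRange (PySem.List.pyGetD _ref (a - 1) []).length (b - 1)
instance (_clust : List Int) (_ref : List (List Int)) : Decidable (Pre_calc_intraedges _clust _ref) := by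
  unfold Pre_calc_intraedges; infer_instance

def pvWitness_calc_intraedges : List Int × List (List Int) := ([1, 2, 2], [[0, 5], [7, 0]])

def Spec_calc_intraedges (_clust : List Int) (_ref : List (List Int)) (out : Int) : Prop := out = calc_intraedges_alt _clust _ref
instance (_clust : List Int) (_ref : List (List Int)) (out : Int) : Decidable (Spec_calc_intraedges _clust _ref out) := by unfold Spec_calc_intraedges; infer_instance

-- ===== CLAIM (what is proved, stated in full; the proofs are below) =====
def Claim_equal_calc_intraedges : Prop := ∀ (_clust : List Int) (_ref : List (List Int)), Dom_calc_intraedges _clust _ref → Pre_calc_intraedges _clust _ref → Spec_calc_intraedges _clust _ref (calc_intraedges _clust _ref)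

-- ===== LEMMAS AND PROOFS =====

-- a skip-branch foldl is an additive sum
theorem pv_foldl_skip {α : Type} (l : List α) (a : Int) (p : α → Bool) (g : α → Int) :
    l.foldl (fun s x => if p x then s else s + g x) a
      = a + (l.map (fun x => if p x then 0 else g x)).sum := by
  have h : (fun (s : Int) x => if p x then s else s + g x)
      = (fun s x => s + if p x then 0 else g x) := by
    funext s x; split <;> simp
  rw [h, PySem.List.foldl_add]

theorem pv_sum_ite_zero {α : Type} [DecidableEq α] (d : List α) (x : α) (g : α → Int)
    (hx : x ∉ d) : (d.map (fun v => if v = x then g v else 0)).sum = 0 := by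
  induction d with
  | nil => simp
  | cons y d ih =>
    simp only [List.mem_cons, not_or] at hx
    simp [List.map_cons, ih hx.2, Ne.symm hx.1]

theorem pv_sum_ite_single {α : Type} [DecidableEq α] (d : List α) (x : α) (g : α → Int)
    (hd : d.Nodup) (hx : x ∈ d) : (d.map (fun v => if v = x then g v else 0)).sum = g x := by
  induction d with
  | nil => simp at hx
  | cons y d ih =>
    rcases List.mem_cons.mp hx with h | h
    · subst h
      simp [pv_sum_ite_zero d x g (List.nodup_cons.mp hd).1]
    · have hyx : y ≠ x := by
        rintro rfl; exact (List.nodup_cons.mp hd).1 h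
      simp [hyx, ih (List.nodup_cons.mp hd).2 h]

theorem pv_sum_map_add {α : Type} (d : List α) (g h : α → Int) :
    (d.map (fun v => g v + h v)).sum = (d.map g).sum + (d.map h).sum := by
  induction d with
  | nil => simp
  | cons y d ih => simp [ih]; ring

-- a sum over the list equals the multiplicity-weighted sum over a nodup superset of its values
theorem pv_sum_count {α : Type} [DecidableEq α] (c d : List α) (g : α → Int)
    (hd : d.Nodup) (hsub : ∀ v ∈ c, v ∈ d) :
    (c.map g).sum = (d.map (fun v => (c.count v : Int) * g v)).sum := by
  induction c with
  | nil => simp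
  | cons x c ih =>
    have hx : x ∈ d := hsub x (by simp)
    have hsub' : ∀ v ∈ c, v ∈ d := fun v hv => hsub v (by simp [hv])
    have hcount : (fun v => ((x :: c).count v : Int) * g v)
        = fun v => ((c.count v : Int) * g v + if v = x then g v else 0) := by
      funext v
      by_cases h : v = x
      · subst h; simp [List.count_cons_self]; ring
      · simp [List.count_cons_of_ne (fun he => h he.symm), h]
    rw [List.map_cons, List.sum_cons, ih hsub', hcount,
      pv_sum_map_add d (fun v => (c.count v : Int) * g v) (fun v => if v = x then g v else 0),
      pv_sum_ite_single d x g hd hx]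
    ring

-- main combinatorial identity, for arbitrary entry function f
theorem pv_main (c : List Int) (f : Int → Int → Int) :
    c.foldl (fun s a => c.foldl (fun s b => if a == b then s else s + f a b) s) 0
      = (let K := c.foldl (fun d v => d.insert v (d.getD v 0 + 1)) (PySem.Dict.empty : PySem.Dict Int Int)
         K.items.foldl (fun t p =>
           K.items.foldl (fun t q => if p.1 == q.1 then t else t + p.2 * q.2 * f p.1 q.1) t) 0) := by
  have hK : c.foldl (fun d v => d.insert v (d.getD v 0 + 1)) (PySem.Dict.empty : PySem.Dict Int Int)
      = PySem.Dict.counter c := PySem.Dict.foldl_insert_getD_add_one_eq_counter c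
  simp only [hK, PySem.Dict.items_counter, ← PySem.List.dedup_eq_ofList]
  have hA : (fun (s : Int) a => c.foldl (fun s b => if a == b then s else s + f a b) s)
      = fun s a => s + (c.map (fun b => if a == b then 0 else f a b)).sum := by
    funext s a; exact pv_foldl_skip c s _ _
  rw [hA, PySem.List.foldl_add]
  have hB : (fun (t : Int) (p : Int × Int) =>
        ((PySem.List.dedup c).map (fun k => (k, (c.count k : Int)))).foldl
          (fun t q => if p.1 == q.1 then t else t + p.2 * q.2 * f p.1 q.1) t)
      = fun t p => t + (((PySem.List.dedup c).map (fun k => (k, (c.count k : Int)))).map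
          (fun q => if p.1 == q.1 then 0 else p.2 * q.2 * f p.1 q.1)).sum := by
    funext t p; exact pv_foldl_skip _ t _ _
  rw [hB, PySem.List.foldl_add]
  simp only [zero_add, List.map_map]
  rw [pv_sum_count c (PySem.List.dedup c) _ (PySem.List.nodup_dedup c)
      (fun v hv => (PySem.List.mem_dedup c v).mpr hv)]
  apply congrArg List.sum
  apply List.map_congr_left
  intro v hv
  simp only [Function.comp]
  rw [pv_sum_count c (PySem.List.dedup c) (fun b => if v == b then 0 else f v b)
      (PySem.List.nodup_dedup c) (fun b hb => (PySem.List.mem_dedup c b).mpr hb),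
      ← List.sum_map_mul_left]
  apply congrArg List.sum
  apply List.map_congr_left
  intro w hw
  simp only [Function.comp]
  by_cases h : v = w
  · simp [h]
  · have hb : (v == w) = false := by simp [h]
    simp [hb, mul_assoc]

-- ===== VERDICT (by name: the statement is the Claim_ definition above) =====
theorem calc_intraedges_spec : Claim_equal_calc_intraedges := by
  intro c r _ _
  unfold Spec_calc_intraedges calc_intraedges calc_intraedges_alt
  exact pv_main c (fun a b => PySem.List.pyGetD (PySem.List.pyGetD r (a - 1) []) (b - 1) 0)
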